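-- pv_equiv track=rewrite | github.com/ErmaRobot/ctf | otw/krypton/fa/keyLength.py | count_gram
-- ===== SOURCE A (Python) =====
-- def count_gram(cipher, inc):
--   m_gram = {}
--   for i in range(0, len(cipher), inc):
--     if cipher[i] in m_gram.keys():
--       m_gram[cipher[i]] += 1
--     else:
--       m_gram[cipher[i]] = 1
--
--   return m_gram
-- ===== SOURCE B (Python) =====
-- def count_gram(cipher, inc):
--   s = [cipher[i] for i in range(0, len(cipher), inc)]
--   return {c: s.count(c) for c in dict.fromkeys(s)}
-- ===== Notes on version B (the rewrite author's own statement) =====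
-- stated objective: idiomatic
-- what changed: A builds the frequency dict in one accumulating pass with an insert-or-increment branch per position; B first materialises the strided sample, then takes its distinct characters in first-occurrence order and counts each one with s.count, a distinct-then-count-each strategy.
import Mathlib
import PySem

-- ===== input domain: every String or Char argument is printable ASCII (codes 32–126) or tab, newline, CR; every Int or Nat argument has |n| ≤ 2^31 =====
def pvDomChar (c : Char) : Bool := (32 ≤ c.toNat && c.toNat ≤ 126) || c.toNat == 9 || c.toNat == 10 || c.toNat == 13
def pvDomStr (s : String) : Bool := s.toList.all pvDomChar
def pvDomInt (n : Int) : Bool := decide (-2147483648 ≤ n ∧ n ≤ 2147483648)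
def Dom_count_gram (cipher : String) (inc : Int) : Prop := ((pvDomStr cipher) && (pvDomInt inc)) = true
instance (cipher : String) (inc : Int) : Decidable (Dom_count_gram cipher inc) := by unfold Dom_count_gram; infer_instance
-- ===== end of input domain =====

-- B replaces A's one-pass insert-or-increment dict accumulation with a distinct-then-count-each
-- strategy (materialise the strided sample, dedup it in first-occurrence order, count each
-- distinct character by scanning); same result, stated objective: idiomatic.


-- ===== PORT A =====
-- Literal port of A: for i in range(0, len(cipher), inc): insert-or-increment m_gram[cipher[i]].
-- cipher[i] is exact via pyGetD: every i produced by range(0, len(cipher), inc) is a valid index.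
def count_gram (cipher : String) (inc : Int) : List (String × Int) :=
  ((PySem.List.pyRange 0 (PySem.Str.len cipher) inc).foldl
    (fun (m : PySem.Dict String Int) i =>
      let k : String := String.ofList [PySem.List.pyGetD cipher.toList i ' ']
      if PySem.Dict.contains m k then PySem.Dict.insert m k (PySem.Dict.getD m k 0 + 1)
      else PySem.Dict.insert m k 1)
    PySem.Dict.empty).items

-- ===== PORT B =====
-- Literal port of B: s = [cipher[i] for i in range(0, len(cipher), inc)];
-- {c: s.count(c) for c in dict.fromkeys(s)}  (dict.fromkeys = PySem.List.dedup).
def count_gram_alt (cipher : String) (inc : Int) : List (String × Int) :=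
  let s : List String := (PySem.List.pyRange 0 (PySem.Str.len cipher) inc).map
    (fun i => String.ofList [PySem.List.pyGetD cipher.toList i ' '])
  (PySem.List.dedup s).map (fun c => (c, (PySem.List.count s c : Int)))

-- ===== PRECONDITION & SPEC =====
-- inc = 0 makes range(0, len, 0) raise ValueError in both A and B; nothing else is excluded.
def Pre_count_gram (cipher : String) (inc : Int) : Prop := inc ≠ 0
instance (cipher : String) (inc : Int) : Decidable (Pre_count_gram cipher inc) := by unfold Pre_count_gram; infer_instance
def pvWitness_count_gram : String × Int := ("abcab", 2)

def Spec_count_gram (cipher : String) (inc : Int) (out : List (String × Int)) : Prop := out = count_gram_alt cipher inc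
instance (cipher : String) (inc : Int) (out : List (String × Int)) : Decidable (Spec_count_gram cipher inc out) := by unfold Spec_count_gram; infer_instance

-- ===== CLAIM (what is proved, stated in full; the proofs are below) =====
def Claim_equal_count_gram : Prop := ∀ (cipher : String) (inc : Int), Dom_count_gram cipher inc → Pre_count_gram cipher inc → Spec_count_gram cipher inc (count_gram cipher inc)

-- ===== LEMMAS AND PROOFS =====

-- A's insert-or-increment step is exactly the counter step: on an absent key getD is 0.
theorem count_gram_step_eq (m : PySem.Dict String Int) (k : String) :
    (if PySem.Dict.contains m k then PySem.Dict.insert m k (PySem.Dict.getD m k 0 + 1)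
     else PySem.Dict.insert m k 1)
    = PySem.Dict.insert m k (PySem.Dict.getD m k 0 + 1) := by
  by_cases h : PySem.Dict.contains m k
  · simp [h]
  · simp only [Bool.not_eq_true] at h
    rw [if_neg (by simp [h]), PySem.Dict.getD_of_not_contains m 0 h]
    norm_num

-- A's fold over the index range equals Counter(s) for the extracted strided sample s.
theorem count_gram_eq_counter (cipher : String) (inc : Int) :
    count_gram cipher inc
    = (PySem.Dict.counter ((PySem.List.pyRange 0 (PySem.Str.len cipher) inc).map
        (fun i => String.ofList [PySem.List.pyGetD cipher.toList i ' ']))).items := by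
  unfold count_gram
  rw [← PySem.Dict.foldl_insert_getD_add_one_eq_counter, List.foldl_map]
  have hstep : (fun (m : PySem.Dict String Int) i =>
      let k : String := String.ofList [PySem.List.pyGetD cipher.toList i ' ']
      if PySem.Dict.contains m k then PySem.Dict.insert m k (PySem.Dict.getD m k 0 + 1)
      else PySem.Dict.insert m k 1)
      = (fun (m : PySem.Dict String Int) (i : Int) =>
          m.insert (String.ofList [PySem.List.pyGetD cipher.toList i ' '])
            (m.getD (String.ofList [PySem.List.pyGetD cipher.toList i ' ']) 0 + 1)) := by
    funext m i
    exact count_gram_step_eq m _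
  rw [hstep]

theorem count_gram_spec' (cipher : String) (inc : Int) :
    count_gram cipher inc = count_gram_alt cipher inc := by
  rw [count_gram_eq_counter]
  rw [PySem.Dict.items_counter]
  simp only [count_gram_alt, PySem.List.dedup_eq_ofList, PySem.List.count_eq]

-- ===== VERDICT (by name: the statement is the Claim_ definition above) =====
theorem count_gram_spec : Claim_equal_count_gram := by
  intro cipher inc _ _
  exact count_gram_spec' cipher inc
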